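-- pv_equiv track=rewrite | github.com/sarahjoseph22194-cmyk/AI-word | task_6.py | matching_pair
-- ===== SOURCE A (Python) =====
-- def matching_pair(person_one: str, person_two: str, sentences:list[list[str]], k: int)-> int:
--     # this function returns the count of many times did person one and person two appeared in the sentences
--     count = 0
--
--     # Tokenize the names into individual words
--     person_one_words = set(person_one.split())
--     person_two_words = set(person_two.split())
--
--     # Iterate through the list of sentences with a sliding window of size k
--     for i in range(len(sentences) - k + 1):
--         # Flatten the sentences in the current window into a single list of words
--         window_words = [word for sentence in sentences[i:i + k] for word in sentence]
--
--         # Check if there's at least one word from person_one and one word from person_two in the window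
--         if any(word in window_words for word in person_one_words) and \
--                 any(word in window_words for word in person_two_words):
--             count += 1  # Increment count if both person_one and person_two words are in the window
--
--     return count
-- ===== SOURCE B (Python) =====
-- def matching_pair(person_one: str, person_two: str, sentences: list[list[str]], k: int) -> int:
--     # Precompute, per sentence, whether it mentions each person; then count
--     # windows by scanning the boolean lists instead of re-flattening words.
--     words_one = set(person_one.split())
--     words_two = set(person_two.split())
--     if k <= 0 or k > len(sentences):
--         return 0
--     has_one = [any(w in words_one for w in s) for s in sentences]
--     has_two = [any(w in words_two for w in s) for s in sentences]
--     return sum(1 for i in range(len(sentences) - k + 1)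
--                if any(has_one[i:i + k]) and any(has_two[i:i + k]))
-- ===== Notes on version B (the rewrite author's own statement) =====
-- stated objective: alternative
-- what changed: B precomputes one boolean per sentence per person (does this sentence mention them) in a single pass over all words, then counts sliding windows by scanning only those booleans, so the per-window flattening of sentences and repeated word-membership scans disappear.
-- intended difference: For k < 0 with len(sentences)+k > 0, Python's negative slice end makes A treat sentences[i:i+k] (for i < -k) as the non-empty window sentences[i:len+k+i], so A returns a positive count when such an accidental window mentions both persons, while B returns 0 there, the intended value since no window of negative length exists. — e.g. on matching_pair("a", "b", [["a"], ["b"], ["x"]], -1): A returns 1, B returns 0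
import Mathlib
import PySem

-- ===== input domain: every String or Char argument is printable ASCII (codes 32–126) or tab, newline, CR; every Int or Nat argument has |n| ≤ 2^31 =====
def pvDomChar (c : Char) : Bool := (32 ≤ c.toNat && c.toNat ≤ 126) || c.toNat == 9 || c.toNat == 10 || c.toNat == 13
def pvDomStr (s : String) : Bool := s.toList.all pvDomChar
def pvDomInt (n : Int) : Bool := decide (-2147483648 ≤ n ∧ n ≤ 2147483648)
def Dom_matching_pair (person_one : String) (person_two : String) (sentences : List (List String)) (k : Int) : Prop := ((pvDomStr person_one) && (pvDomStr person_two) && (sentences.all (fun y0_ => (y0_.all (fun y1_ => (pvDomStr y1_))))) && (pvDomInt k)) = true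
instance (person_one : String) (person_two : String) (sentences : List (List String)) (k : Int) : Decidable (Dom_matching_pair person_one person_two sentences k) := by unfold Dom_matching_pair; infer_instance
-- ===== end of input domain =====

-- B precomputes one boolean per sentence per person once, then counts windows over those
-- booleans (objective: alternative — the per-window flattening and word-membership scans disappear).

-- ===== PORT A =====
def matching_pair (person_one : String) (person_two : String) (sentences : List (List String)) (k : Int) : Int :=
  let person_one_words := PySem.Set.ofList (PySem.Str.split₀ person_one)
  let person_two_words := PySem.Set.ofList (PySem.Str.split₀ person_two)
  (PySem.List.pyRange 0 ((sentences.length : Int) - k + 1) 1).foldl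
    (fun count i =>
      let window_words := (PySem.List.slice sentences (some i) (some (i + k))).flatMap (fun sentence => sentence)
      if (person_one_words.any fun word => window_words.contains word) &&
         (person_two_words.any fun word => window_words.contains word)
      then count + 1 else count) 0

-- ===== PORT B =====
def matching_pair_alt (person_one : String) (person_two : String) (sentences : List (List String)) (k : Int) : Int :=
  let words_one := PySem.Set.ofList (PySem.Str.split₀ person_one)
  let words_two := PySem.Set.ofList (PySem.Str.split₀ person_two)
  if k ≤ 0 || ((sentences.length : Int) < k) then 0
  else
    let has_one := sentences.map (fun s => s.any fun w => PySem.Set.contains words_one w)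
    let has_two := sentences.map (fun s => s.any fun w => PySem.Set.contains words_two w)
    (PySem.List.pyRange 0 ((sentences.length : Int) - k + 1) 1).foldl
      (fun count i =>
        if (PySem.List.slice has_one (some i) (some (i + k))).any (fun b => b) &&
           (PySem.List.slice has_two (some i) (some (i + k))).any (fun b => b)
        then count + 1 else count) 0

-- ===== PRECONDITION & SPEC =====
-- For k < 0 with len(sentences)+k > 0, Python's negative slice end makes A treat
-- sentences[i:i+k] (for i < -k) as the non-empty window sentences[i:len+k+i], so A returns a
-- positive count when such an accidental window mentions both persons, while B returns 0 there,
-- the intended value since no window of negative length exists.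
def D_matching_pair (person_one : String) (person_two : String) (sentences : List (List String)) (k : Int) : Prop :=
  ∃ i < min (-k).toNat sentences.length, ∀ p ∈ [person_one, person_two],
    ∃ x ∈ PySem.Str.split₀ p, ∃ t ∈ (sentences.drop i).take ((sentences.length : Int) + k).toNat, x ∈ t

instance (person_one : String) (person_two : String) (sentences : List (List String)) (k : Int) : Decidable (D_matching_pair person_one person_two sentences k) := by unfold D_matching_pair; infer_instance

def Spec_matching_pair (person_one : String) (person_two : String) (sentences : List (List String)) (k : Int) (out : Int) : Prop := ¬ D_matching_pair person_one person_two sentences k → out = matching_pair_alt person_one person_two sentences k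
instance (person_one : String) (person_two : String) (sentences : List (List String)) (k : Int) (out : Int) : Decidable (Spec_matching_pair person_one person_two sentences k out) := by unfold Spec_matching_pair; infer_instance

def pvDiffWitness_matching_pair : String × String × List (List String) × Int := ("a", "b", [["a"], ["b"], ["x"]], -1)
def pvDiffWitnessOut_matching_pair : Int × Int := (1, 0)

-- ===== CLAIM (what is proved, stated in full; the proofs are below) =====
def Claim_unchanged_matching_pair : Prop := ∀ (person_one : String) (person_two : String) (sentences : List (List String)) (k : Int), Dom_matching_pair person_one person_two sentences k → Spec_matching_pair person_one person_two sentences k (matching_pair person_one person_two sentences k)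
def Claim_changed_matching_pair : Prop := Dom_matching_pair (pvDiffWitness_matching_pair.1) (pvDiffWitness_matching_pair.2.1) (pvDiffWitness_matching_pair.2.2.1) (pvDiffWitness_matching_pair.2.2.2) ∧ D_matching_pair (pvDiffWitness_matching_pair.1) (pvDiffWitness_matching_pair.2.1) (pvDiffWitness_matching_pair.2.2.1) (pvDiffWitness_matching_pair.2.2.2) ∧ matching_pair (pvDiffWitness_matching_pair.1) (pvDiffWitness_matching_pair.2.1) (pvDiffWitness_matching_pair.2.2.1) (pvDiffWitness_matching_pair.2.2.2) = pvDiffWitnessOut_matching_pair.1 ∧ matching_pair_alt (pvDiffWitness_matching_pair.1) (pvDiffWitness_matching_pair.2.1) (pvDiffWitness_matching_pair.2.2.1) (pvDiffWitness_matching_pair.2.2.2) = pvDiffWitnessOut_matching_pair.2 ∧ pvDiffWitnessOut_matching_pair.1 ≠ pvDiffWitnessOut_matching_pair.2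
def Claim_exact_matching_pair : Prop := ∀ (person_one : String) (person_two : String) (sentences : List (List String)) (k : Int), Dom_matching_pair person_one person_two sentences k → D_matching_pair person_one person_two sentences k → matching_pair person_one person_two sentences k ≠ matching_pair_alt person_one person_two sentences k

-- ===== LEMMAS AND PROOFS =====

-- A counting foldl is the countP of its condition.
theorem pvFoldlCount (l : List Int) (p : Int → Bool) (c0 : Int) :
    l.foldl (fun c i => if p i then c + 1 else c) c0 = c0 + (l.countP p : Int) := by
  induction l generalizing c0 with
  | nil => simp
  | cons x xs ih => by_cases h : p x <;> simp [h, ih, Int.add_comm, Int.add_left_comm]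

-- "some person word occurs in the flattened window" = "some sentence of the window mentions a person word"
theorem pvAnyFlat (pw : List String) (ws : List (List String)) :
    (pw.any fun w => (ws.flatMap (fun s => s)).contains w)
      = ws.any (fun s => s.any fun w => pw.contains w) := by
  rw [Bool.eq_iff_iff]
  simp only [List.any_eq_true, List.mem_flatMap, List.contains_eq_mem, decide_eq_true_eq]
  tauto

theorem pvSliceMap {α β : Type} (f : α → β) (xs : List α) (a b : Int) :
    PySem.List.slice (xs.map f) (some a) (some b) = (PySem.List.slice xs (some a) (some b)).map f := by
  simp [PySem.List.slice, List.map_take, List.map_drop]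

-- A's window condition looked at through B's per-sentence booleans.
theorem pvWindowCond (pw : List String) (sentences : List (List String)) (a b : Int) :
    (PySem.List.slice (sentences.map (fun s => s.any fun w => pw.contains w)) (some a) (some b)).any (fun x => x)
      = (pw.any fun w => ((PySem.List.slice sentences (some a) (some b)).flatMap (fun s => s)).contains w) := by
  rw [pvSliceMap, pvAnyFlat, List.any_map]
  rfl

theorem pvSliceNil {α : Type} (xs : List α) (a b : Int)
    (h : PySem.List.clampIdx xs.length b ≤ PySem.List.clampIdx xs.length a) :
    PySem.List.slice xs (some a) (some b) = [] := by
  simp [PySem.List.slice, Nat.sub_eq_zero_of_le h]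

-- A's window condition at window start i, as a single predicate (proof-only helper).
def pvCondA (p1 p2 : String) (s : List (List String)) (k i : Int) : Bool :=
  ((PySem.Set.ofList (PySem.Str.split₀ p1)).any fun word =>
      ((PySem.List.slice s (some i) (some (i + k))).flatMap (fun sentence => sentence)).contains word) &&
  ((PySem.Set.ofList (PySem.Str.split₀ p2)).any fun word =>
      ((PySem.List.slice s (some i) (some (i + k))).flatMap (fun sentence => sentence)).contains word)

theorem pvSetOfListAny (xs : List String) (p : String → Bool) :
    (PySem.Set.ofList xs).any p = xs.any p := by
  rw [Bool.eq_iff_iff]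
  simp only [List.any_eq_true]
  constructor
  · rintro ⟨x, hx, hp⟩; exact ⟨x, (PySem.Set.mem_ofList xs x).1 hx, hp⟩
  · rintro ⟨x, hx, hp⟩; exact ⟨x, (PySem.Set.mem_ofList xs x).2 hx, hp⟩

theorem pvCondIff (p : String) (ws : List (List String)) :
    (((PySem.Set.ofList (PySem.Str.split₀ p)).any fun word => (ws.flatMap (fun t => t)).contains word) = true)
      ↔ ∃ x ∈ PySem.Str.split₀ p, ∃ t ∈ ws, x ∈ t := by
  rw [pvSetOfListAny]
  simp only [List.any_eq_true, List.contains_eq_mem, List.mem_flatMap, decide_eq_true_eq]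

theorem pvAval (p1 p2 : String) (s : List (List String)) (k : Int) :
    matching_pair p1 p2 s k
      = ((PySem.List.pyRange 0 ((s.length : Int) - k + 1) 1).countP (pvCondA p1 p2 s k) : Int) := by
  simp only [matching_pair]
  rw [show (fun (count i : Int) =>
        if ((PySem.Set.ofList (PySem.Str.split₀ p1)).any fun word =>
              ((PySem.List.slice s (some i) (some (i + k))).flatMap (fun sentence => sentence)).contains word) &&
           ((PySem.Set.ofList (PySem.Str.split₀ p2)).any fun word =>
              ((PySem.List.slice s (some i) (some (i + k))).flatMap (fun sentence => sentence)).contains word)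
        then count + 1 else count)
      = (fun (c i : Int) => if pvCondA p1 p2 s k i then c + 1 else c) from by
        funext c i; rfl]
  rw [pvFoldlCount]
  ring

-- For k ≤ 0 outside D_, every window A looks at is empty or a non-matching accidental window.
theorem pvCondAFalse (p1 p2 : String) (s : List (List String)) (k : Int)
    (hk : k ≤ 0) (hD : ¬ D_matching_pair p1 p2 s k) (i : Int) (hi : 0 ≤ i) :
    pvCondA p1 p2 s k i = false := by
  by_cases hcb : PySem.List.clampIdx s.length (i + k) ≤ PySem.List.clampIdx s.length i
  · unfold pvCondA
    rw [pvSliceNil _ _ _ hcb]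
    simp
  · have key : i + k < 0 ∧ 0 ≤ (s.length : Int) + i + k ∧ i < (s.length : Int) ∧ 0 < (s.length : Int) + k := by
      simp only [PySem.List.clampIdx] at hcb
      split_ifs at hcb <;> omega
    obtain ⟨h1, h2, h3, h4⟩ := key
    have e1 : PySem.List.clampIdx s.length i = i.toNat := by
      simp only [PySem.List.clampIdx]; split_ifs <;> omega
    have e2 : PySem.List.clampIdx s.length (i + k) = ((s.length : Int) + i + k).toNat := by
      simp only [PySem.List.clampIdx]; split_ifs <;> omega
    have hw : PySem.List.slice s (some i) (some (i + k))
        = (s.drop i.toNat).take ((s.length : Int) + k).toNat := by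
      simp only [PySem.List.slice, e1, e2]
      rw [show ((s.length : Int) + i + k).toNat - i.toNat = ((s.length : Int) + k).toNat from by omega]
    unfold D_matching_pair at hD
    unfold pvCondA
    rw [hw]
    by_contra hcc
    rw [Bool.not_eq_false, Bool.and_eq_true, pvCondIff, pvCondIff] at hcc
    refine hD ⟨i.toNat, by omega, ?_⟩
    intro p hp
    rcases List.mem_pair.mp hp with h | h <;> subst h
    · exact hcc.1
    · exact hcc.2

theorem matching_pair_changed : Claim_changed_matching_pair := by
  unfold Claim_changed_matching_pair; decide

theorem matching_pair_tight : Claim_exact_matching_pair := by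
  intro p1 p2 s k _ hD
  obtain ⟨j, hjlt, hall⟩ := hD
  have hk : k < 0 := by omega
  have hpos : 0 < (s.length : Int) + k := by
    obtain ⟨x, _, t, ht, _⟩ := hall p1 (by simp)
    by_contra hle
    rw [show ((s.length : Int) + k).toNat = 0 from by omega, List.take_zero] at ht
    exact absurd ht (List.not_mem_nil)
  have hB : matching_pair_alt p1 p2 s k = 0 := by
    simp only [matching_pair_alt]
    rw [if_pos (by simp; omega)]
  rw [hB, pvAval]
  have hm1 := hall p1 (by simp)
  have hm2 := hall p2 (by simp)
  have hjn : j < s.length := by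
    by_contra hge
    obtain ⟨x, _, t, ht, _⟩ := hm1
    rw [List.drop_eq_nil_of_le (by omega), List.take_nil] at ht
    exact absurd ht (List.not_mem_nil)
  have hjk : (j : Int) < -k := by omega
  have e1 : PySem.List.clampIdx s.length ((j : Nat) : Int) = j := by
    simp only [PySem.List.clampIdx]; split_ifs <;> omega
  have e2 : PySem.List.clampIdx s.length (((j : Nat) : Int) + k)
      = ((s.length : Int) + (j : Int) + k).toNat := by
    simp only [PySem.List.clampIdx]; split_ifs <;> omega
  have hw : PySem.List.slice s (some ((j : Nat) : Int)) (some (((j : Nat) : Int) + k))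
      = (s.drop j).take ((s.length : Int) + k).toNat := by
    simp only [PySem.List.slice, e1, e2]
    rw [show ((s.length : Int) + (j : Int) + k).toNat - j = ((s.length : Int) + k).toNat from by omega]
  have hcond : pvCondA p1 p2 s k ((j : Nat) : Int) = true := by
    unfold pvCondA
    rw [hw, Bool.and_eq_true, pvCondIff, pvCondIff]
    exact ⟨hm1, hm2⟩
  have hmem : ((j : Nat) : Int) ∈ PySem.List.pyRange 0 ((s.length : Int) - k + 1) 1 :=
    PySem.List.mem_pyRange_one.mpr ⟨by omega, by omega⟩
  have hpos' : 0 < (PySem.List.pyRange 0 ((s.length : Int) - k + 1) 1).countP (pvCondA p1 p2 s k) := by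
    rw [List.countP_pos_iff]
    exact ⟨_, hmem, hcond⟩
  omega

theorem matching_pair_spec : Claim_unchanged_matching_pair := by
  intro p1 p2 s k _ hD
  show matching_pair p1 p2 s k = matching_pair_alt p1 p2 s k
  rw [pvAval]
  by_cases hg : (decide (k ≤ 0) || decide ((s.length : Int) < k)) = true
  · have hB : matching_pair_alt p1 p2 s k = 0 := by
      simp only [matching_pair_alt]
      rw [if_pos hg]
    rw [hB]
    rcases Bool.or_eq_true_iff.mp hg with hk | hk
    · have hk' : k ≤ 0 := of_decide_eq_true hk
      have : (PySem.List.pyRange 0 ((s.length : Int) - k + 1) 1).countP (pvCondA p1 p2 s k) = 0 := by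
        rw [List.countP_eq_zero]
        intro i hi
        have h0 : (0 : Int) ≤ i := (PySem.List.mem_pyRange_one.mp hi).1
        simp [pvCondAFalse p1 p2 s k hk' hD i h0]
      rw [this]; rfl
    · have hk' : (s.length : Int) < k := of_decide_eq_true hk
      rw [PySem.List.pyRange_one_eq_nil (by omega)]
      rfl
  · simp only [matching_pair_alt]
    rw [if_neg hg]
    rw [show (fun (count i : Int) =>
          if (PySem.List.slice (s.map (fun t => t.any fun w => PySem.Set.contains (PySem.Set.ofList (PySem.Str.split₀ p1)) w)) (some i) (some (i + k))).any (fun b => b) &&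
             (PySem.List.slice (s.map (fun t => t.any fun w => PySem.Set.contains (PySem.Set.ofList (PySem.Str.split₀ p2)) w)) (some i) (some (i + k))).any (fun b => b)
          then count + 1 else count)
        = (fun (c i : Int) => if pvCondA p1 p2 s k i then c + 1 else c) from by
          funext c i
          simp only [pvCondA, PySem.Set.contains, pvWindowCond]
          rfl]
    rw [pvFoldlCount]
    ring
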